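-- pv_equiv track=rewrite | github.com/ryugahidiky/my_utils | Codejam/soduku.py | solve
-- ===== SOURCE A (Python) =====
-- def solve(bo):
--     find = find_empty(bo)
--     if not find:
--         return True
--     else:
--         row, col = find
--
--     for i in range(1,5):
--         if valid(bo, i, (row, col)):
--             bo[row][col] = i
--
--             if solve(bo):
--                 return True
--
--             bo[row][col] = 0
--
--     return False
--
-- def valid(bo, num, pos):
--     # Check row
--     for i in range(len(bo[0])):
--         if bo[pos[0]][i] == num and pos[1] != i:
--             return False
--
--     # Check column
--     for i in range(len(bo)):
--         if bo[i][pos[1]] == num and pos[0] != i: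
--             return False
--     return True
--
-- def find_empty(bo):
--     for i in range(len(bo)):
--         for j in range(len(bo[0])):
--             if bo[i][j] == 0:
--                 return (i, j)  # row, col
--
--     return None
-- ===== SOURCE B (Python) =====
-- def solve(bo):
--     # Iterative backtracking with an explicit stack over the precomputed empty
--     # cells, instead of A's recursion with a fresh find_empty scan each call.
--     width = len(bo[0]) if bo else 0
--     empties = [(i, j) for i in range(len(bo)) for j in range(width)
--                if bo[i][j] == 0]
--     stack = []          # stack[t] = value currently placed at empties[t]
--     k = 0               # index of the empty cell being worked on
--     val = 1             # next candidate value to try at empties[k]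
--     while k < len(empties):
--         r, c = empties[k]
--         while val <= 4 and not valid(bo, val, (r, c)):
--             val += 1
--         if val <= 4:                 # place val and move forward
--             bo[r][c] = val
--             stack.append(val)
--             k += 1
--             val = 1
--         else:                        # exhausted 1..4: backtrack
--             if not stack:
--                 return False
--             k -= 1
--             r, c = empties[k]
--             bo[r][c] = 0
--             val = stack.pop() + 1
--     return True
--
--
-- def valid(bo, num, pos):
--     # Check row
--     for i in range(len(bo[0])):
--         if bo[pos[0]][i] == num and pos[1] != i:
--             return False
--
--     # Check column
--     for i in range(len(bo)):
--         if bo[i][pos[1]] == num and pos[0] != i: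
--             return False
--     return True
-- ===== Notes on version B (the rewrite author's own statement) =====
-- stated objective: alternative
-- what changed: A's recursive backtracking with a fresh find_empty board rescan at every call is replaced by an iterative loop over the precomputed list of empty cells with an explicit stack of placed values: advance on the first valid value 1..4, and on exhaustion reset the cell and pop back to resume the previous cell from its next value.
import Mathlib
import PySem

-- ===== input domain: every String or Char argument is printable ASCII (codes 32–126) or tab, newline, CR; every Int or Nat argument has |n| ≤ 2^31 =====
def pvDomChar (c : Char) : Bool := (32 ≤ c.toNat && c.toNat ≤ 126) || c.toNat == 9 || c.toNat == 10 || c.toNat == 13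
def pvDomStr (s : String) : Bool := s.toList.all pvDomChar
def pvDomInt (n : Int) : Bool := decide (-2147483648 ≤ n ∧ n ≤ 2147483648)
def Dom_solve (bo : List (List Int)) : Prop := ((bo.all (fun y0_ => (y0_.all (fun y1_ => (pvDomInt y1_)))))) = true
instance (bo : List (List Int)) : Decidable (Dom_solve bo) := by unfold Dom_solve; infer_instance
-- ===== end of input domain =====

set_option maxHeartbeats 1000000

-- B replaces A's recursion (with a fresh find_empty rescan per call) by an iterative
-- explicit-stack backtracking loop over the precomputed empty cells; both mutate the
-- Python board identically, and the equivalence proved here is about the return value.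


-- ===== PORT A =====
-- shared board primitives: bo[r][c] read / write, len(bo[0])
def getCell (bo : List (List Int)) (r c : Nat) : Int := (bo.getD r []).getD c 0

def setCell (bo : List (List Int)) (r c : Nat) (v : Int) : List (List Int) :=
  bo.set r ((bo.getD r []).set c v)

def widthB (bo : List (List Int)) : Nat := (bo.headD []).length

-- Python `valid(bo, num, pos)` (shared verbatim by A and B): row scan then column scan
def validP (bo : List (List Int)) (num : Int) (r c : Nat) : Bool :=
  ((List.range (widthB bo)).all fun i => !(getCell bo r i == num && decide (c ≠ i))) &&
  ((List.range bo.length).all fun i => !(getCell bo i c == num && decide (r ≠ i)))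

-- Python `find_empty(bo)`: first (i, j) in row-major order with bo[i][j] == 0
def findEmpty (bo : List (List Int)) : Option (Nat × Nat) :=
  (List.range bo.length).findSome? fun i =>
    ((List.range (widthB bo)).find? fun j => getCell bo i j == 0).map fun j => (i, j)

-- the empty cells in row-major order (B's comprehension; its length serves as A's fuel guard)
def emptiesB (bo : List (List Int)) : List (Nat × Nat) :=
  (List.range bo.length).flatMap fun i =>
    ((List.range (widthB bo)).filter fun j => getCell bo i j == 0).map fun j => (i, j)

-- A's `for i in range(1,5): …` loop body, abstracted over the recursive call
def tryValsA (rec : List (List Int) → Bool × List (List Int)) (r c : Nat) :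
    List Int → List (List Int) → Bool × List (List Int)
  | [], b => (false, b)
  | v :: vs, b =>
    if validP b v r c then
      let p := rec (setCell b r c v)
      if p.1 then (true, p.2) else tryValsA rec r c vs (setCell p.2 r c 0)
    else tryValsA rec r c vs b

-- A's recursive solve; the fuel (number of empty cells + 1) is a totality guard only:
-- each recursive call is made on a board with one empty cell fewer.
def solveFuel : Nat → List (List Int) → Bool × List (List Int)
  | 0, b => (false, b)
  | f + 1, b =>
    match findEmpty b with
    | none => (true, b)
    | some (r, c) => tryValsA (solveFuel f) r c [1, 2, 3, 4] b

def solve (bo : List (List Int)) : Bool := (solveFuel ((emptiesB bo).length + 1) bo).1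

-- ===== PORT B =====
-- B's inner `while val <= 4 and not valid(...)` scan: first valid value in val..4;
-- the fuel (5 - val).toNat counts exactly the candidate values left, a totality guard.
def firstValidF : Nat → List (List Int) → Nat → Nat → Int → Option Int
  | 0, _, _, _, _ => none
  | f + 1, bo, r, c, val =>
    if validP bo val r c then some val else firstValidF f bo r c (val + 1)

def firstValid (bo : List (List Int)) (r c : Nat) (val : Int) : Option Int :=
  firstValidF (5 - val).toNat bo r c val

-- B's outer while loop; state = (board, index k of the current empty cell, next value
-- to try there, stack of placed values).  The fuel is a totality guard only.
def loopB : Nat → List (List Int) → List (Nat × Nat) → Nat → Int → List Int →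
    Bool × List (List Int)
  | 0, b, _, _, _, _ => (false, b)
  | f + 1, b, es, k, val, stack =>
    if k < es.length then
      match firstValid b (es.getD k (0, 0)).1 (es.getD k (0, 0)).2 val with
      | some v => loopB f (setCell b (es.getD k (0, 0)).1 (es.getD k (0, 0)).2 v) es (k + 1) 1 (v :: stack)
      | none =>
        match stack with
        | [] => (false, b)
        | v :: rest =>
          loopB f (setCell b (es.getD (k - 1) (0, 0)).1 (es.getD (k - 1) (0, 0)).2 0) es (k - 1) (v + 1) rest
    else (true, b)

-- enough fuel for the whole backtracking search over n empty cells
def fuelB (n : Nat) : Nat := (n + 1) * 6 ^ (n + 1) + n + 1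

def solve_alt (bo : List (List Int)) : Bool :=
  (loopB (fuelB (emptiesB bo).length) bo (emptiesB bo) 0 1 []).1

-- ===== PRECONDITION & SPEC =====
-- Pre_ excludes ragged boards with a row shorter than row 0: there Python A raises
-- IndexError on almost all of them (and on the rest returns only because its scan
-- happens to stop early), while B's comprehension over all cells raises IndexError.
def Pre_solve (bo : List (List Int)) : Prop :=
  ∀ row ∈ bo, (bo.headD []).length ≤ row.length

instance (bo : List (List Int)) : Decidable (Pre_solve bo) := by
  unfold Pre_solve; infer_instance

def pvWitness_solve : List (List Int) := [[1, 0], [0, 2]]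

def Spec_solve (bo : List (List Int)) (out : Bool) : Prop := out = solve_alt bo
instance (bo : List (List Int)) (out : Bool) : Decidable (Spec_solve bo out) := by
  unfold Spec_solve; infer_instance

-- ===== CLAIM (what is proved, stated in full; the proofs are below) =====
def Claim_equal_solve : Prop :=
  ∀ (bo : List (List Int)), Dom_solve bo → Pre_solve bo → Spec_solve bo (solve bo)

-- ===== LEMMAS AND PROOFS =====

-- board shape: every row at least as long as row 0 (exactly what Pre_solve says)
def Shape (bo : List (List Int)) : Prop := ∀ row ∈ bo, widthB bo ≤ row.length

-- cells of a list that are in range and empty on board b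
def GoodCells (b : List (List Int)) (es : List (Nat × Nat)) : Prop :=
  ∀ p ∈ es, p.1 < b.length ∧ p.2 < (b.getD p.1 []).length ∧ getCell b p.1 p.2 = 0

theorem gdE {α : Type} (l : List α) (d : α) (i : Nat) (h : i < l.length) :
    l.getD i d = l[i] := by
  rw [List.getD_eq_getElem?_getD, List.getElem?_eq_getElem h]; rfl

theorem getD_mem (es : List (Nat × Nat)) (i : Nat) (hi : i < es.length) :
    es.getD i (0, 0) ∈ es := by
  rw [gdE es (0, 0) i hi]; exact List.getElem_mem hi

-- ---- setCell / getCell basics ----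
theorem length_setCell (b : List (List Int)) (r c : Nat) (v : Int) :
    (setCell b r c v).length = b.length := by
  simp [setCell]

theorem setCell_out (b : List (List Int)) (r c : Nat) (v : Int) (h : b.length ≤ r) :
    setCell b r c v = b := by
  unfold setCell; exact List.set_eq_of_length_le h

theorem getD_set (b : List (List Int)) (r : Nat) (row : List Int) (r' : Nat) :
    (b.set r row).getD r' [] = if r = r' ∧ r < b.length then row else b.getD r' [] := by
  by_cases hr : r < b.length
  · by_cases h : r = r'
    · subst h
      simp [List.getD_eq_getElem?_getD, hr]
    · simp [List.getD_eq_getElem?_getD, List.getElem?_set_ne h, h]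
  · rw [List.set_eq_of_length_le (by omega)]
    simp [hr]

theorem rowlen_setCell (b : List (List Int)) (r c : Nat) (v : Int) (r' : Nat) :
    ((setCell b r c v).getD r' []).length = (b.getD r' []).length := by
  unfold setCell; rw [getD_set]
  split
  · rename_i h; obtain ⟨h1, _⟩ := h; subst h1; simp
  · rfl

theorem widthB_eq (bo : List (List Int)) : widthB bo = (bo.getD 0 []).length := by
  cases bo <;> rfl

theorem width_setCell (b : List (List Int)) (r c : Nat) (v : Int) :
    widthB (setCell b r c v) = widthB b := by
  rw [widthB_eq, widthB_eq]; exact rowlen_setCell b r c v 0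

theorem get_setCell_self (b : List (List Int)) (r c : Nat) (v : Int)
    (hr : r < b.length) (hc : c < (b.getD r []).length) :
    getCell (setCell b r c v) r c = v := by
  unfold getCell setCell
  rw [getD_set, if_pos ⟨rfl, hr⟩, List.getD_eq_getElem?_getD,
    List.getElem?_set_self (by simpa using hc)]
  rfl

theorem get_setCell_ne (b : List (List Int)) (r c : Nat) (v : Int) (r' c' : Nat)
    (h : (r', c') ≠ (r, c)) :
    getCell (setCell b r c v) r' c' = getCell b r' c' := by
  unfold getCell setCell
  rw [getD_set]
  split
  · rename_i hif
    obtain ⟨h1, _⟩ := hif; subst h1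
    have hcc : c ≠ c' := by
      intro e; subst e; exact h rfl
    simp [List.getD_eq_getElem?_getD, List.getElem?_set_ne hcc]
  · rfl

theorem setCell_setCell (b : List (List Int)) (r c : Nat) (v w : Int) :
    setCell (setCell b r c v) r c w = setCell b r c w := by
  by_cases hr : r < b.length
  · unfold setCell
    rw [getD_set, if_pos ⟨rfl, hr⟩, List.set_set, List.set_set]
  · rw [setCell_out b r c v (by omega)]

theorem setCell_zero_self (b : List (List Int)) (r c : Nat)
    (hr : r < b.length) (hc : c < (b.getD r []).length) (h0 : getCell b r c = 0) :
    setCell b r c 0 = b := by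
  unfold setCell
  have hrow : (b.getD r []).set c 0 = b.getD r [] := by
    apply List.ext_getElem (by simp)
    intro i h1 h2
    rw [List.getElem_set]
    split
    · rename_i he; subst he
      unfold getCell at h0
      rw [List.getD_eq_getElem?_getD, List.getElem?_eq_getElem hc] at h0
      exact h0.symm
    · rfl
  rw [hrow, gdE b [] r hr]
  apply List.ext_getElem (by simp)
  intro i h1 h2
  rw [List.getElem_set]
  split
  · rename_i he; subst he; rfl
  · rfl

theorem goodCells_setCell_of_not_mem (b : List (List Int)) (es : List (Nat × Nat))
    (r c : Nat) (v : Int) (h : GoodCells b es) (hnm : (r, c) ∉ es) :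
    GoodCells (setCell b r c v) es := by
  intro p hp
  obtain ⟨p1, p2⟩ := p
  obtain ⟨h1, h2, h3⟩ := h (p1, p2) hp
  refine ⟨by rwa [length_setCell], by rwa [rowlen_setCell], ?_⟩
  rw [get_setCell_ne]
  · exact h3
  · intro e; rw [e] at hp; exact hnm hp

theorem shape_rowlen (bo : List (List Int)) (hs : Shape bo) (r : Nat)
    (hr : r < bo.length) : widthB bo ≤ (bo.getD r []).length := by
  rw [gdE bo [] r hr]
  exact hs bo[r] (List.getElem_mem hr)

theorem shape_setCell (b : List (List Int)) (r c : Nat) (v : Int) (hs : Shape b) :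
    Shape (setCell b r c v) := by
  by_cases hr : r < b.length
  · intro row hrow
    rw [width_setCell]
    unfold setCell at hrow
    rcases List.mem_or_eq_of_mem_set hrow with h | h
    · exact hs row h
    · rw [h, List.length_set]
      exact shape_rowlen b hs r hr
  · rw [setCell_out b r c v (by omega)]; exact hs

-- ---- emptiesB characterisation ----
def cellsOf (h w : Nat) : List (Nat × Nat) :=
  (List.range h).flatMap fun i => (List.range w).map fun j => (i, j)

theorem mem_cellsOf (h w : Nat) (p : Nat × Nat) :
    p ∈ cellsOf h w ↔ p.1 < h ∧ p.2 < w := by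
  obtain ⟨i, j⟩ := p
  simp only [cellsOf, List.mem_flatMap, List.mem_map, List.mem_range]
  constructor
  · rintro ⟨i', hi', j', hj', heq⟩
    injection heq with e1 e2
    subst e1; subst e2
    exact ⟨hi', hj'⟩
  · rintro ⟨h1, h2⟩
    exact ⟨i, h1, j, h2, rfl⟩

theorem cellsOf_succ (n w : Nat) :
    cellsOf (n + 1) w = cellsOf n w ++ (List.range w).map (fun j => (n, j)) := by
  unfold cellsOf
  rw [List.range_succ, List.flatMap_append]
  simp

theorem nodup_cellsOf (h w : Nat) : (cellsOf h w).Nodup := by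
  induction h with
  | zero => simp [cellsOf]
  | succ n ih =>
    rw [cellsOf_succ]
    apply List.Nodup.append ih
    · exact List.Nodup.map (fun a b e => by injection e) List.nodup_range
    · intro p hp1 hp2
      have e1 : p.1 < n := ((mem_cellsOf n w p).mp hp1).1
      obtain ⟨j, _, rfl⟩ := List.mem_map.mp hp2
      simp at e1

theorem filter_flatMap' {α β : Type} (l : List α) (g : α → List β) (p : β → Bool) :
    (l.flatMap g).filter p = l.flatMap fun a => (g a).filter p := by
  induction l with
  | nil => rfl
  | cons x xs ih => simp [List.flatMap_cons, List.filter_append, ih]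

theorem emptiesB_eq_filter (bo : List (List Int)) :
    emptiesB bo = (cellsOf bo.length (widthB bo)).filter
      (fun p => getCell bo p.1 p.2 == 0) := by
  unfold emptiesB cellsOf
  rw [filter_flatMap']
  congr 1
  funext i
  rw [List.filter_map]
  rfl

theorem nodup_emptiesB (bo : List (List Int)) : (emptiesB bo).Nodup := by
  rw [emptiesB_eq_filter]
  exact (nodup_cellsOf _ _).filter _

theorem mem_emptiesB (bo : List (List Int)) (p : Nat × Nat) :
    p ∈ emptiesB bo ↔ p.1 < bo.length ∧ p.2 < widthB bo ∧ getCell bo p.1 p.2 = 0 := by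
  rw [emptiesB_eq_filter, List.mem_filter, mem_cellsOf, beq_iff_eq]
  tauto

theorem goodCells_emptiesB (bo : List (List Int)) (hs : Shape bo) :
    GoodCells bo (emptiesB bo) := by
  intro p hp
  obtain ⟨h1, h2, h3⟩ := (mem_emptiesB bo p).mp hp
  exact ⟨h1, lt_of_lt_of_le h2 (shape_rowlen bo hs p.1 h1), h3⟩

theorem head?_flatMap {α β : Type} (l : List α) (g : α → List β) :
    (l.flatMap g).head? = l.findSome? fun a => (g a).head? := by
  induction l with
  | nil => rfl
  | cons x xs ih =>
    rw [List.flatMap_cons, List.findSome?_cons]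
    cases hg : g x with
    | nil => simpa using ih
    | cons y ys => simp

theorem head?_filter {α : Type} (p : α → Bool) (l : List α) :
    (l.filter p).head? = l.find? p := by
  induction l with
  | nil => rfl
  | cons x xs ih =>
    by_cases h : p x <;> simp [List.filter_cons, List.find?_cons, h, ih]

theorem findEmpty_eq_head (bo : List (List Int)) :
    findEmpty bo = (emptiesB bo).head? := by
  unfold findEmpty emptiesB
  rw [head?_flatMap]
  congr 1
  funext i
  rw [List.head?_map, head?_filter]

theorem mem_of_head?_filter {α : Type} (p : α → Bool) (l : List α) (x : α)
    (hx : (l.filter p).head? = some x) : x ∈ l.filter p := by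
  cases hfl : l.filter p with
  | nil => rw [hfl] at hx; simp at hx
  | cons z zs =>
    rw [hfl] at hx
    rw [List.head?_cons, Option.some.injEq] at hx
    rw [← hx]
    exact List.mem_cons_self ..

theorem filter_update {α : Type} (p q : α → Bool) (l : List α) (x : α)
    (hx : (l.filter p).head? = some x)
    (hq : ∀ y ∈ l, y ≠ x → q y = p y) (hqx : q x = false) (hn : l.Nodup) :
    l.filter q = (l.filter p).tail := by
  induction l with
  | nil => simp at hx
  | cons a l ih =>
    have hpx : p x = true := (List.mem_filter.mp (mem_of_head?_filter p (a :: l) x hx)).2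
    by_cases hpa : p a
    · have hx' : a = x := by
        rw [List.filter_cons, if_pos hpa, List.head?_cons, Option.some.injEq] at hx
        exact hx
      subst hx'
      conv_rhs => rw [List.filter_cons, if_pos hpa, List.tail_cons]
      conv_lhs => rw [List.filter_cons, if_neg (by simp [hqx])]
      apply List.filter_congr
      intro y hy
      apply hq y (List.mem_cons_of_mem _ hy)
      intro e; subst e
      exact (List.nodup_cons.mp hn).1 hy
    · have hx' : (List.filter p l).head? = some x := by
        rwa [List.filter_cons, if_neg hpa] at hx
      have hax : a ≠ x := by
        intro e; subst e; exact hpa hpx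
      have hpa' : p a = false := by simpa using hpa
      have hqa : q a = false := by
        rw [hq a (List.mem_cons_self ..) hax]; exact hpa'
      conv_lhs => rw [List.filter_cons, if_neg (by simp [hqa])]
      conv_rhs => rw [List.filter_cons, if_neg hpa]
      exact ih hx' (fun y hy hne => hq y (List.mem_cons_of_mem _ hy) hne)
        (List.nodup_cons.mp hn).2

theorem head?_mem {α : Type} (l : List α) (x : α) (h : l.head? = some x) : x ∈ l := by
  cases l with
  | nil => simp at h
  | cons z zs =>
    rw [List.head?_cons, Option.some.injEq] at h
    rw [← h]; exact List.mem_cons_self ..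

theorem emptiesB_setCell_tail (bo : List (List Int)) (r c : Nat) (v : Int)
    (hs : Shape bo) (hv : v ≠ 0) (hh : (emptiesB bo).head? = some (r, c)) :
    emptiesB (setCell bo r c v) = (emptiesB bo).tail := by
  have hmem : (r, c) ∈ emptiesB bo := head?_mem _ _ hh
  obtain ⟨h1, h2, h3⟩ := (mem_emptiesB bo (r, c)).mp hmem
  have hc' : c < (bo.getD r []).length := lt_of_lt_of_le h2 (shape_rowlen bo hs r h1)
  rw [emptiesB_eq_filter bo, emptiesB_eq_filter (setCell bo r c v),
    length_setCell, width_setCell]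
  apply filter_update _ _ _ (r, c)
  · rw [← emptiesB_eq_filter]; exact hh
  · intro y hy hne
    obtain ⟨y1, y2⟩ := y
    show (getCell (setCell bo r c v) y1 y2 == 0) = (getCell bo y1 y2 == 0)
    rw [get_setCell_ne bo r c v y1 y2 hne]
  · show (getCell (setCell bo r c v) r c == 0) = false
    rw [get_setCell_self bo r c v h1 hc']
    simp [hv]
  · exact nodup_cellsOf _ _

-- ---- firstValid ----
theorem firstValidF_bounds : ∀ (f : Nat) (bo : List (List Int)) (r c : Nat) (val v : Int),
    f = (5 - val).toNat → firstValidF f bo r c val = some v → val ≤ v ∧ v ≤ 4 := by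
  intro f
  induction f with
  | zero => intro bo r c val v _ h; cases h
  | succ f ih =>
    intro bo r c val v hrel h
    rw [firstValidF] at h
    by_cases hv : validP bo val r c
    · rw [if_pos hv] at h
      injection h with h'
      omega
    · rw [if_neg hv] at h
      have := ih bo r c (val + 1) v (by omega) h
      omega

theorem firstValid_bounds (bo : List (List Int)) (r c : Nat) (val v : Int)
    (h : firstValid bo r c val = some v) : val ≤ v ∧ v ≤ 4 :=
  firstValidF_bounds _ bo r c val v rfl h

theorem firstValid_eq (bo : List (List Int)) (r c : Nat) (val : Int) :
    firstValid bo r c val =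
      if val ≤ 4 then
        (if validP bo val r c then some val else firstValid bo r c (val + 1))
      else none := by
  by_cases h4 : val ≤ 4
  · rw [if_pos h4]
    unfold firstValid
    have h5 : (5 - val).toNat = (5 - (val + 1)).toNat + 1 := by omega
    rw [h5]
    rfl
  · rw [if_neg h4]
    unfold firstValid
    have h5 : (5 - val).toNat = 0 := by omega
    rw [h5]
    rfl

-- ---- the common functional search (proof-side reference semantics) ----
def searchFrom : List (List Int) → List (Nat × Nat) → Int → Bool × List (List Int)
  | b, [], _ => (true, b)
  | b, (r, c) :: rest, val =>
    match h : firstValid b r c val with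
    | none => (false, b)
    | some v =>
      let p := searchFrom (setCell b r c v) rest 1
      if p.1 then p else searchFrom (setCell p.2 r c 0) ((r, c) :: rest) (v + 1)
  termination_by _ es val => (es.length, (5 - val).toNat)
  decreasing_by
  · exact Prod.Lex.left _ _ (by simp)
  · exact Prod.Lex.right _ (by have := firstValid_bounds _ _ _ _ _ h; omega)

theorem searchFrom_nil (b : List (List Int)) (val : Int) :
    searchFrom b [] val = (true, b) := by
  rw [searchFrom]

theorem searchFrom_cons (b : List (List Int)) (r c : Nat) (rest : List (Nat × Nat))
    (val : Int) :
    searchFrom b ((r, c) :: rest) val =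
      match firstValid b r c val with
      | none => (false, b)
      | some v =>
        let p := searchFrom (setCell b r c v) rest 1
        if p.1 then p else searchFrom (setCell p.2 r c 0) ((r, c) :: rest) (v + 1) := by
  conv_lhs => rw [searchFrom]
  split
  · rename_i heq; rw [heq]
  · rename_i v heq; rw [heq]

theorem searchFrom_cons_none (b : List (List Int)) (r c : Nat)
    (rest : List (Nat × Nat)) (val : Int) (hF : firstValid b r c val = none) :
    searchFrom b ((r, c) :: rest) val = (false, b) := by
  rw [searchFrom_cons, hF]

theorem searchFrom_cons_some (b : List (List Int)) (r c : Nat)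
    (rest : List (Nat × Nat)) (val v : Int) (hF : firstValid b r c val = some v) :
    searchFrom b ((r, c) :: rest) val =
      (let p := searchFrom (setCell b r c v) rest 1
       if p.1 then p else searchFrom (setCell p.2 r c 0) ((r, c) :: rest) (v + 1)) := by
  rw [searchFrom_cons, hF]

theorem searchFrom_restore : ∀ (n : Nat) (b : List (List Int)) (es : List (Nat × Nat)) (val : Int),
    6 * es.length + (5 - val).toNat ≤ n →
    GoodCells b es → es.Nodup → (searchFrom b es val).1 = false →
    (searchFrom b es val).2 = b := by
  intro n
  induction n with
  | zero =>
    intro b es val hm hg hn hf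
    cases es with
    | nil => rw [searchFrom_nil] at hf; simp at hf
    | cons rc rest => rw [List.length_cons] at hm; omega
  | succ n ih =>
    intro b es val hm hg hn hf
    cases es with
    | nil => rw [searchFrom_nil] at hf; simp at hf
    | cons rc rest =>
      obtain ⟨r, c⟩ := rc
      rw [List.length_cons] at hm
      cases hF : firstValid b r c val with
      | none => rw [searchFrom_cons_none b r c rest val hF]
      | some v =>
        obtain ⟨hvval, hv4⟩ := firstValid_bounds b r c val v hF
        obtain ⟨hr, hc, h0⟩ := hg (r, c) (List.mem_cons_self ..)
        have hnm : (r, c) ∉ rest := (List.nodup_cons.mp hn).1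
        have hgrest : GoodCells (setCell b r c v) rest :=
          goodCells_setCell_of_not_mem b rest r c v
            (fun p hp => hg p (List.mem_cons_of_mem _ hp)) hnm
        have hnrest : rest.Nodup := (List.nodup_cons.mp hn).2
        rw [searchFrom_cons_some b r c rest val v hF] at hf ⊢
        cases hq : searchFrom (setCell b r c v) rest 1 with
        | mk q1 q2 =>
          rw [hq] at hf
          cases q1 with
          | true => simp at hf
          | false =>
            simp at hf ⊢
            have hq2 : q2 = setCell b r c v := by
              have h2 := ih (setCell b r c v) rest 1 (by omega) hgrest hnrest (by rw [hq])
              rw [hq] at h2; exact h2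
            rw [hq2, setCell_setCell, setCell_zero_self b r c hr hc h0] at hf ⊢
            exact ih b ((r, c) :: rest) (v + 1)
              (by rw [List.length_cons]; omega) hg hn hf

-- ---- bridge 1: A's recursion = searchFrom ----
def valsFrom (val : Int) : List Int :=
  if val ≤ 4 then val :: valsFrom (val + 1) else []
  termination_by (5 - val).toNat
  decreasing_by omega

theorem valsFrom_step (val : Int) (h : val ≤ 4) : valsFrom val = val :: valsFrom (val + 1) := by
  rw [valsFrom, if_pos h]

theorem valsFrom_stop (val : Int) (h : ¬ val ≤ 4) : valsFrom val = [] := by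
  rw [valsFrom, if_neg h]

theorem valsFrom_one : valsFrom 1 = [1, 2, 3, 4] := by
  rw [valsFrom_step 1 (by norm_num), show (1 : Int) + 1 = 2 from by norm_num,
    valsFrom_step 2 (by norm_num), show (2 : Int) + 1 = 3 from by norm_num,
    valsFrom_step 3 (by norm_num), show (3 : Int) + 1 = 4 from by norm_num,
    valsFrom_step 4 (by norm_num), show (4 : Int) + 1 = 5 from by norm_num,
    valsFrom_stop 5 (by norm_num)]

theorem tryValsA_step_none (f : Nat) (b : List (List Int)) (r c : Nat)
    (rest : List (Nat × Nat)) (val : Int) (h4 : ¬ val ≤ 4) :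
    tryValsA (solveFuel f) r c (valsFrom val) b = searchFrom b ((r, c) :: rest) val := by
  rw [valsFrom, if_neg h4, searchFrom_cons_none b r c rest val
    (by rw [firstValid_eq, if_neg h4])]
  rfl

theorem tryValsA_eq_searchFrom (f : Nat) (b : List (List Int)) (r c : Nat)
    (rest : List (Nat × Nat))
    (hrec : ∀ v : Int, 1 ≤ v → v ≤ 4 →
      solveFuel f (setCell b r c v) = searchFrom (setCell b r c v) rest 1)
    (hg : GoodCells b ((r, c) :: rest)) (hn : ((r, c) :: rest).Nodup) :
    ∀ val : Int, 1 ≤ val →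
      tryValsA (solveFuel f) r c (valsFrom val) b = searchFrom b ((r, c) :: rest) val := by
  obtain ⟨hr, hc, h0⟩ := hg (r, c) (List.mem_cons_self ..)
  have hnm : (r, c) ∉ rest := (List.nodup_cons.mp hn).1
  have hgrest : GoodCells b rest := fun p hp => hg p (List.mem_cons_of_mem _ hp)
  have hnrest : rest.Nodup := (List.nodup_cons.mp hn).2
  have H : ∀ n : Nat, ∀ val : Int, (5 - val).toNat ≤ n → 1 ≤ val →
      tryValsA (solveFuel f) r c (valsFrom val) b = searchFrom b ((r, c) :: rest) val := by
    intro n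
    induction n with
    | zero => intro val hle h1; exact tryValsA_step_none f b r c rest val (by omega)
    | succ n ih =>
      intro val hle h1
      by_cases h4 : val ≤ 4
      · rw [valsFrom, if_pos h4]
        by_cases hvld : validP b val r c
        · have hFV : firstValid b r c val = some val := by
            rw [firstValid_eq, if_pos h4, if_pos hvld]
          rw [searchFrom_cons_some b r c rest val val hFV]
          rw [tryValsA, if_pos hvld]
          rw [hrec val h1 h4]
          cases hq : searchFrom (setCell b r c val) rest 1 with
          | mk q1 q2 =>
            cases q1 with
            | true => simp
            | false =>
              simp
              have hq2 : q2 = setCell b r c val := by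
                have h2 := searchFrom_restore (6 * rest.length + 4) (setCell b r c val)
                  rest 1 (by norm_num)
                  (goodCells_setCell_of_not_mem b rest r c val hgrest hnm)
                  hnrest (by rw [hq])
                rw [hq] at h2; exact h2
              rw [hq2, setCell_setCell, setCell_zero_self b r c hr hc h0]
              exact ih (val + 1) (by omega) (by omega)
        · rw [tryValsA, if_neg hvld]
          have hFF : firstValid b r c val = firstValid b r c (val + 1) := by
            rw [firstValid_eq, if_pos h4, if_neg hvld]
          have hS : searchFrom b ((r, c) :: rest) val = searchFrom b ((r, c) :: rest) (val + 1) := by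
            cases hF : firstValid b r c (val + 1) with
            | none =>
              rw [searchFrom_cons_none b r c rest val (hFF.trans hF),
                searchFrom_cons_none b r c rest (val + 1) hF]
            | some v =>
              rw [searchFrom_cons_some b r c rest val v (hFF.trans hF),
                searchFrom_cons_some b r c rest (val + 1) v hF]
          rw [hS]
          exact ih (val + 1) (by omega) (by omega)
      · exact tryValsA_step_none f b r c rest val h4
  exact fun val h1 => H (5 - val).toNat val le_rfl h1

theorem solveFuel_none (f : Nat) (b : List (List Int)) (h : findEmpty b = none) :
    solveFuel (f + 1) b = (true, b) := by
  rw [solveFuel, h]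

theorem solveFuel_some (f : Nat) (b : List (List Int)) (r c : Nat)
    (h : findEmpty b = some (r, c)) :
    solveFuel (f + 1) b = tryValsA (solveFuel f) r c [1, 2, 3, 4] b := by
  rw [solveFuel, h]

theorem solveFuel_eq_searchFrom :
    ∀ n : Nat, ∀ b : List (List Int), (emptiesB b).length ≤ n → Shape b →
      ∀ f : Nat, (emptiesB b).length + 1 ≤ f →
      solveFuel f b = searchFrom b (emptiesB b) 1 := by
  intro n
  induction n with
  | zero =>
    intro b hlen hs f hf
    have he : emptiesB b = [] := List.length_eq_zero_iff.mp (by omega)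
    obtain ⟨f', rfl⟩ : ∃ f', f = f' + 1 := ⟨f - 1, by omega⟩
    rw [he, searchFrom_nil]
    exact solveFuel_none f' b (by rw [findEmpty_eq_head, he]; rfl)
  | succ n ih =>
    intro b hlen hs f hf
    obtain ⟨f', rfl⟩ : ∃ f', f = f' + 1 := ⟨f - 1, by omega⟩
    cases hE : emptiesB b with
    | nil =>
      rw [searchFrom_nil]
      exact solveFuel_none f' b (by rw [findEmpty_eq_head, hE]; rfl)
    | cons rc rest =>
      obtain ⟨r, c⟩ := rc
      have hhead : (emptiesB b).head? = some (r, c) := by rw [hE]; rfl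
      have hElen : (emptiesB b).length = rest.length + 1 := by rw [hE]; rfl
      rw [solveFuel_some f' b r c (by rw [findEmpty_eq_head, hhead])]
      rw [← valsFrom_one]
      refine tryValsA_eq_searchFrom f' b r c rest ?_ ?_ ?_ 1 le_rfl
      · intro v h1 h4
        have htail : emptiesB (setCell b r c v) = rest := by
          rw [emptiesB_setCell_tail b r c v hs (by omega) hhead, hE, List.tail_cons]
        have hlen' : (emptiesB (setCell b r c v)).length ≤ n := by
          rw [htail]; omega
        rw [ih (setCell b r c v) hlen' (shape_setCell b r c v hs) f'
          (by rw [htail]; omega), htail]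
      · rw [← hE]; exact goodCells_emptiesB b hs
      · rw [← hE]; exact nodup_emptiesB b

-- ---- bridge 2: B's loop = unwind over searchFrom ----
def unwind : List (List Int) → List (Nat × Nat) → Nat → Int → List Int →
    Bool × List (List Int)
  | b, es, k, val, [] =>
    match searchFrom b (es.drop k) val with
    | (true, x) => (true, x)
    | (false, _) => (false, b)
  | b, es, k, val, v :: rest =>
    match searchFrom b (es.drop k) val with
    | (true, x) => (true, x)
    | (false, _) =>
      unwind (setCell b (es.getD (k - 1) (0, 0)).1 (es.getD (k - 1) (0, 0)).2 0)
        es (k - 1) (v + 1) rest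

theorem unwind_true (b : List (List Int)) (es : List (Nat × Nat)) (k : Nat)
    (val : Int) (st : List Int) (x : List (List Int))
    (h : searchFrom b (es.drop k) val = (true, x)) :
    unwind b es k val st = (true, x) := by
  cases st <;> simp [unwind, h]

theorem unwind_false_nil (b : List (List Int)) (es : List (Nat × Nat)) (k : Nat)
    (val : Int) (y : List (List Int))
    (h : searchFrom b (es.drop k) val = (false, y)) :
    unwind b es k val [] = (false, b) := by
  simp [unwind, h]

theorem unwind_false_cons (b : List (List Int)) (es : List (Nat × Nat)) (k : Nat)
    (val v : Int) (rest : List Int) (y : List (List Int))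
    (h : searchFrom b (es.drop k) val = (false, y)) :
    unwind b es k val (v :: rest) =
      unwind (setCell b (es.getD (k - 1) (0, 0)).1 (es.getD (k - 1) (0, 0)).2 0)
        es (k - 1) (v + 1) rest := by
  simp [unwind, h]

theorem unwind_val_congr (b : List (List Int)) (es : List (Nat × Nat)) (k : Nat)
    (val val' : Int) (st : List Int)
    (h : searchFrom b (es.drop k) val = searchFrom b (es.drop k) val') :
    unwind b es k val st = unwind b es k val' st := by
  cases st <;> simp only [unwind, h]

theorem drop_cons_at (es : List (Nat × Nat)) (i : Nat) (hi : i < es.length) :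
    es.drop i = es.getD i (0, 0) :: es.drop (i + 1) := by
  rw [gdE es (0, 0) i hi]
  exact List.drop_eq_getElem_cons hi

theorem getD_not_mem_drop (es : List (Nat × Nat)) (hn : es.Nodup) (i : Nat)
    (hi : i < es.length) : es.getD i (0, 0) ∉ es.drop (i + 1) := by
  intro hmem
  rw [gdE es (0, 0) i hi] at hmem
  obtain ⟨j, hj, hje⟩ := List.mem_iff_getElem.mp hmem
  rw [List.getElem_drop] at hje
  rw [List.length_drop] at hj
  have : i + 1 + j = i := (List.Nodup.getElem_inj_iff hn).mp hje
  omega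

theorem searchFrom_at_none (b : List (List Int)) (es : List (Nat × Nat)) (k : Nat)
    (val : Int) (r c : Nat) (hk : k < es.length) (hrc : es.getD k (0, 0) = (r, c))
    (hF : firstValid b r c val = none) :
    searchFrom b (es.drop k) val = (false, b) := by
  rw [drop_cons_at es k hk, hrc, searchFrom_cons_none b r c _ val hF]

theorem unwind_place (b : List (List Int)) (es : List (Nat × Nat)) (k : Nat)
    (val v : Int) (stack : List Int) (r c : Nat)
    (hk : k < es.length) (hrc : es.getD k (0, 0) = (r, c))
    (hg : GoodCells b (es.drop k)) (hn : es.Nodup)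
    (hF : firstValid b r c val = some v) :
    unwind b es k val stack = unwind (setCell b r c v) es (k + 1) 1 (v :: stack) := by
  have hdrop : es.drop k = (r, c) :: es.drop (k + 1) := by
    rw [drop_cons_at es k hk, hrc]
  obtain ⟨hr, hc, h0⟩ := hg (r, c) (by rw [hdrop]; exact List.mem_cons_self ..)
  have hnm : (r, c) ∉ es.drop (k + 1) := by
    have := getD_not_mem_drop es hn k hk; rwa [hrc] at this
  have hgd : GoodCells b (es.drop (k + 1)) := fun p hp =>
    hg p (by rw [hdrop]; exact List.mem_cons_of_mem _ hp)
  have hgd' : GoodCells (setCell b r c v) (es.drop (k + 1)) :=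
    goodCells_setCell_of_not_mem b _ r c v hgd hnm
  have hnd' : (es.drop (k + 1)).Nodup := (List.drop_sublist _ _).nodup hn
  have hreset : setCell (setCell b r c v) r c 0 = b := by
    rw [setCell_setCell, setCell_zero_self b r c hr hc h0]
  cases hq : searchFrom (setCell b r c v) (es.drop (k + 1)) 1 with
  | mk q1 q2 =>
    have hS : searchFrom b (es.drop k) val =
        (if q1 then (q1, q2)
         else searchFrom (setCell q2 r c 0) ((r, c) :: es.drop (k + 1)) (v + 1)) := by
      rw [hdrop, searchFrom_cons_some b r c _ val v hF, hq]
    cases q1 with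
    | true =>
      have hS' : searchFrom b (es.drop k) val = (true, q2) := by rw [hS]; simp
      rw [unwind_true b es k val stack q2 hS',
        unwind_true (setCell b r c v) es (k + 1) 1 (v :: stack) q2 hq]
    | false =>
      have hq2 : q2 = setCell b r c v := by
        have h2 := searchFrom_restore (6 * (es.drop (k + 1)).length + 4)
          (setCell b r c v) (es.drop (k + 1)) 1 (by norm_num) hgd' hnd' (by rw [hq])
        rw [hq] at h2; exact h2
      have hS' : searchFrom b (es.drop k) val = searchFrom b (es.drop k) (v + 1) := by
        rw [hS, if_neg (by simp), hq2, hreset, ← hdrop]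
      rw [unwind_false_cons (setCell b r c v) es (k + 1) 1 v stack q2 hq]
      have hsimp : k + 1 - 1 = k := by omega
      rw [hsimp, hrc]
      show unwind b es k val stack = unwind (setCell (setCell b r c v) r c 0) es k (v + 1) stack
      rw [hreset]
      exact unwind_val_congr b es k val (v + 1) stack hS'

-- ---- the fuel bound for loopB ----
def Vs : List Int → Nat → Nat
  | [], _ => 0
  | v :: rest, e => v.toNat * 6 ^ e + Vs rest (e + 1)

def Vm (n k : Nat) (val : Int) (stack : List Int) : Nat :=
  (if k < n then val.toNat * 6 ^ (n - k) else 0) + Vs stack (n - k + 1)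

def boundF (n k : Nat) (val : Int) (stack : List Int) : Nat :=
  (6 ^ (n + 1) - Vm n k val stack) * (n + 1) + (n - k) + 1

theorem Vs_cons (v : Int) (rest : List Int) (e : Nat) :
    Vs (v :: rest) e = v.toNat * 6 ^ e + Vs rest (e + 1) := rfl

theorem val_pow_le (a e : Nat) (ha : a ≤ 5) : a * 6 ^ e + 6 ^ e ≤ 6 ^ (e + 1) := by
  calc a * 6 ^ e + 6 ^ e = (a + 1) * 6 ^ e := by ring
    _ ≤ 6 * 6 ^ e := Nat.mul_le_mul_right _ (by omega)
    _ = 6 ^ (e + 1) := by rw [pow_succ]; ring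

theorem Vs_le (s : List Int) (e : Nat) (h : ∀ v ∈ s, v.toNat ≤ 5) :
    Vs s e + 6 ^ e ≤ 6 ^ (e + s.length) := by
  induction s generalizing e with
  | nil => simp [Vs]
  | cons v rest ih =>
    have h1 : v.toNat ≤ 5 := h v (List.mem_cons_self ..)
    have h2 := ih (e + 1) (fun x hx => h x (List.mem_cons_of_mem _ hx))
    have h3 := val_pow_le v.toNat e h1
    have h4 : e + 1 + rest.length = e + (v :: rest).length := by
      rw [List.length_cons]; omega
    calc Vs (v :: rest) e + 6 ^ e
        = (v.toNat * 6 ^ e + 6 ^ e) + Vs rest (e + 1) := by simp [Vs]; ring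
      _ ≤ 6 ^ (e + 1) + Vs rest (e + 1) := by omega
      _ ≤ 6 ^ (e + 1 + rest.length) := by omega
      _ = 6 ^ (e + (v :: rest).length) := by rw [h4]

theorem Vm_lt (n k : Nat) (val : Int) (stack : List Int) (hk : k ≤ n)
    (hs : stack.length = k) (hval : val.toNat ≤ 5)
    (hst : ∀ v ∈ stack, v.toNat ≤ 5) : Vm n k val stack < 6 ^ (n + 1) := by
  have h2 := Vs_le stack (n - k + 1) hst
  have he : n - k + 1 + stack.length = n + 1 := by omega
  rw [he] at h2
  have hvt := val_pow_le val.toNat (n - k) hval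
  have hp1 : 1 ≤ 6 ^ (n - k) := Nat.one_le_pow _ _ (by norm_num)
  have hp2 : 1 ≤ 6 ^ (n - k + 1) := Nat.one_le_pow _ _ (by norm_num)
  unfold Vm
  split
  · generalize hA : val.toNat * 6 ^ (n - k) = A at hvt ⊢
    generalize hB : (6 : Nat) ^ (n - k) = B at hvt hp1
    generalize hC : (6 : Nat) ^ (n - k + 1) = C at hvt h2 hp2
    generalize hS : Vs stack (n - k + 1) = S at h2 ⊢
    generalize hP : (6 : Nat) ^ (n + 1) = P at h2 ⊢
    omega
  · generalize hC : (6 : Nat) ^ (n - k + 1) = C at h2 hp2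
    generalize hS : Vs stack (n - k + 1) = S at h2 ⊢
    generalize hP : (6 : Nat) ^ (n + 1) = P at h2 ⊢
    omega

theorem bound_step (P L a b x y : Nat) (hab : a < b) (hbP : b ≤ P)
    (hxy : x + 1 ≤ L + y) :
    (P - b) * L + x + 1 < (P - a) * L + y + 1 := by
  have h1 : (P - b) + 1 ≤ P - a := by omega
  have h2 : ((P - b) + 1) * L ≤ (P - a) * L := Nat.mul_le_mul_right _ h1
  have h3 : (P - b) * L + L ≤ (P - a) * L := by
    calc (P - b) * L + L = ((P - b) + 1) * L := by ring
      _ ≤ (P - a) * L := h2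
  generalize hq : (P - a) * L = q at h3 ⊢
  generalize hp : (P - b) * L = p at h3 ⊢
  omega

theorem bound_place (n k : Nat) (val v : Int) (stack : List Int)
    (hk : k < n) (hs : stack.length = k) (h1 : 1 ≤ val) (h5 : val ≤ 5)
    (hvv : val ≤ v) (hv4 : v ≤ 4) (hst : ∀ w ∈ stack, 1 ≤ w ∧ w ≤ 4) :
    boundF n (k + 1) 1 (v :: stack) < boundF n k val stack := by
  have hstle : ∀ w ∈ stack, w.toNat ≤ 5 := fun w hw => by
    have := (hst w hw).2; omega
  have hVold : Vm n k val stack = val.toNat * 6 ^ (n - k) + Vs stack (n - k + 1) := by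
    unfold Vm; rw [if_pos hk]
  have he1 : n - (k + 1) + 1 = n - k := by omega
  have hVnew : Vm n (k + 1) 1 (v :: stack) =
      (if k + 1 < n then 6 ^ (n - (k + 1)) else 0) +
        (v.toNat * 6 ^ (n - k) + Vs stack (n - k + 1)) := by
    unfold Vm
    rw [he1, Vs_cons]
    norm_num
  have hlt_new : Vm n (k + 1) 1 (v :: stack) < 6 ^ (n + 1) := by
    apply Vm_lt n (k + 1) 1 (v :: stack) (by omega) (by simp [hs]) (by omega)
    intro w hw
    rcases List.mem_cons.mp hw with h | h
    · subst h; omega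
    · exact hstle w h
  have hmono : val.toNat * 6 ^ (n - k) ≤ v.toNat * 6 ^ (n - k) :=
    Nat.mul_le_mul_right _ (by omega)
  have hVmlt : Vm n k val stack < Vm n (k + 1) 1 (v :: stack) ∨
      (Vm n k val stack = Vm n (k + 1) 1 (v :: stack) ∧ n - (k + 1) < n - k) := by
    rw [hVold, hVnew]
    by_cases hcase : k + 1 < n
    · left
      rw [if_pos hcase]
      have hE : 1 ≤ 6 ^ (n - (k + 1)) := Nat.one_le_pow _ _ (by norm_num)
      generalize hA : val.toNat * 6 ^ (n - k) = A at hmono ⊢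
      generalize hB : v.toNat * 6 ^ (n - k) = B at hmono ⊢
      generalize hEe : (6 : Nat) ^ (n - (k + 1)) = E at hE ⊢
      generalize hS : Vs stack (n - k + 1) = S
      omega
    · rw [if_neg hcase]
      by_cases hlv : val < v
      · left
        have hstep : val.toNat * 6 ^ (n - k) + 6 ^ (n - k) ≤ v.toNat * 6 ^ (n - k) := by
          calc val.toNat * 6 ^ (n - k) + 6 ^ (n - k)
              = (val.toNat + 1) * 6 ^ (n - k) := by ring
            _ ≤ v.toNat * 6 ^ (n - k) := Nat.mul_le_mul_right _ (by omega)
        have hB1 : 1 ≤ 6 ^ (n - k) := Nat.one_le_pow _ _ (by norm_num)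
        generalize hA : val.toNat * 6 ^ (n - k) = A at hstep ⊢
        generalize hB : v.toNat * 6 ^ (n - k) = B at hstep ⊢
        generalize hC : (6 : Nat) ^ (n - k) = C at hstep hB1
        generalize hS : Vs stack (n - k + 1) = S
        omega
      · right
        have hveq : v = val := by omega
        subst hveq
        constructor
        · omega
        · omega
  unfold boundF
  rcases hVmlt with h | ⟨heq, hxy⟩
  · exact bound_step (6 ^ (n + 1)) (n + 1) (Vm n k val stack)
      (Vm n (k + 1) 1 (v :: stack)) (n - (k + 1)) (n - k) h (by omega) (by omega)
  · rw [heq]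
    generalize (6 ^ (n + 1) - Vm n (k + 1) 1 (v :: stack)) * (n + 1) = q
    omega

theorem bound_pop (n k : Nat) (val v : Int) (stack : List Int)
    (hk1 : 1 ≤ k) (hk : k ≤ n) (h1 : 1 ≤ val) (h5 : val ≤ 5)
    (hv1 : 1 ≤ v) (hv4 : v ≤ 4) (hs : (v :: stack).length = k)
    (hst : ∀ w ∈ stack, 1 ≤ w ∧ w ≤ 4) :
    boundF n (k - 1) (v + 1) stack < boundF n k val (v :: stack) := by
  have hstle : ∀ w ∈ stack, w.toNat ≤ 5 := fun w hw => by
    have := (hst w hw).2; omega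
  rw [List.length_cons] at hs
  have he1 : n - (k - 1) = n - k + 1 := by omega
  have he2 : n - (k - 1) + 1 = n - k + 2 := by omega
  have hVold : Vm n k val (v :: stack) =
      (if k < n then val.toNat * 6 ^ (n - k) else 0) +
        (v.toNat * 6 ^ (n - k + 1) + Vs stack (n - k + 2)) := by
    unfold Vm
    rw [Vs_cons]
  have htn : (v + 1).toNat = v.toNat + 1 := by omega
  have hVnew : Vm n (k - 1) (v + 1) stack =
      (v.toNat + 1) * 6 ^ (n - k + 1) + Vs stack (n - k + 2) := by
    unfold Vm
    rw [if_pos (by omega), he2, he1, htn]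
  have hlt_new : Vm n (k - 1) (v + 1) stack < 6 ^ (n + 1) :=
    Vm_lt n (k - 1) (v + 1) stack (by omega) (by omega) (by omega) hstle
  have hVmlt : Vm n k val (v :: stack) < Vm n (k - 1) (v + 1) stack := by
    rw [hVold, hVnew]
    have hexp : (v.toNat + 1) * 6 ^ (n - k + 1) =
        v.toNat * 6 ^ (n - k + 1) + 6 ^ (n - k + 1) := by ring
    rw [hexp]
    have hvt := val_pow_le val.toNat (n - k) (by omega)
    have hB1 : 1 ≤ 6 ^ (n - k) := Nat.one_le_pow _ _ (by norm_num)
    have hC1 : 1 ≤ 6 ^ (n - k + 1) := Nat.one_le_pow _ _ (by norm_num)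
    split
    · generalize hA : val.toNat * 6 ^ (n - k) = A at hvt ⊢
      generalize hB : (6 : Nat) ^ (n - k) = B at hvt hB1
      generalize hC : (6 : Nat) ^ (n - k + 1) = C at hvt hC1 ⊢
      generalize hV : v.toNat * 6 ^ (n - k + 1) = V
      generalize hS : Vs stack (n - k + 2) = S
      omega
    · generalize hC : (6 : Nat) ^ (n - k + 1) = C at hC1 ⊢
      generalize hV : v.toNat * 6 ^ (n - k + 1) = V
      generalize hS : Vs stack (n - k + 2) = S
      omega
  unfold boundF
  exact bound_step (6 ^ (n + 1)) (n + 1) (Vm n k val (v :: stack))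
    (Vm n (k - 1) (v + 1) stack) (n - (k - 1)) (n - k) hVmlt (by omega) (by omega)

theorem loopB_succ (f : Nat) (b : List (List Int)) (es : List (Nat × Nat)) (k : Nat)
    (val : Int) (stack : List Int) :
    loopB (f + 1) b es k val stack =
      if k < es.length then
        match firstValid b (es.getD k (0, 0)).1 (es.getD k (0, 0)).2 val with
        | some v => loopB f (setCell b (es.getD k (0, 0)).1 (es.getD k (0, 0)).2 v) es (k + 1) 1 (v :: stack)
        | none =>
          match stack with
          | [] => (false, b)
          | v :: rest =>
            loopB f (setCell b (es.getD (k - 1) (0, 0)).1 (es.getD (k - 1) (0, 0)).2 0) es (k - 1) (v + 1) rest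
      else (true, b) := rfl

theorem loopB_eq_unwind :
    ∀ f : Nat, ∀ (b : List (List Int)) (es : List (Nat × Nat)) (k : Nat)
      (val : Int) (stack : List Int),
      (∀ p ∈ es, p.1 < b.length ∧ p.2 < (b.getD p.1 []).length) →
      GoodCells b (es.drop k) → es.Nodup → stack.length = k → k ≤ es.length →
      1 ≤ val → val ≤ 5 → (∀ w ∈ stack, 1 ≤ w ∧ w ≤ 4) →
      boundF es.length k val stack ≤ f →
      loopB f b es k val stack = unwind b es k val stack := by
  intro f
  induction f with
  | zero =>
    intro b es k val stack _ _ _ _ _ _ _ _ hbound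
    exfalso
    unfold boundF at hbound
    generalize (6 ^ (es.length + 1) - Vm es.length k val stack) * (es.length + 1) = X at hbound
    omega
  | succ f ih =>
    intro b es k val stack hR hZ hn hsl hk h1 h5 hst hbound
    rw [loopB_succ]
    by_cases hlt : k < es.length
    · rw [if_pos hlt]
      cases hrc : es.getD k (0, 0) with
      | mk r c =>
        dsimp only
        split
        · rename_i v hF
          have hbnds := firstValid_bounds b r c val v hF
          have hdrop : es.drop k = (r, c) :: es.drop (k + 1) := by
            rw [drop_cons_at es k hlt, hrc]
          obtain ⟨hr, hc, h0⟩ := hZ (r, c) (by rw [hdrop]; exact List.mem_cons_self ..)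
          have hnm : (r, c) ∉ es.drop (k + 1) := by
            have := getD_not_mem_drop es hn k hlt; rwa [hrc] at this
          have hR' : ∀ p ∈ es, p.1 < (setCell b r c v).length ∧
              p.2 < ((setCell b r c v).getD p.1 []).length := by
            intro p hp
            obtain ⟨a1, a2⟩ := hR p hp
            exact ⟨by rwa [length_setCell], by rwa [rowlen_setCell]⟩
          have hZ' : GoodCells (setCell b r c v) (es.drop (k + 1)) :=
            goodCells_setCell_of_not_mem b _ r c v
              (fun p hp => hZ p (by rw [hdrop]; exact List.mem_cons_of_mem _ hp)) hnm
          have hst' : ∀ w ∈ v :: stack, 1 ≤ w ∧ w ≤ 4 := by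
            intro w hw
            rcases List.mem_cons.mp hw with h | h
            · subst h; constructor <;> omega
            · exact hst w h
          have hbnd' : boundF es.length (k + 1) 1 (v :: stack) ≤ f := by
            have := bound_place es.length k val v stack hlt hsl h1 h5
              hbnds.1 hbnds.2 hst
            omega
          rw [ih (setCell b r c v) es (k + 1) 1 (v :: stack) hR' hZ' hn
            (by simp [hsl]) (by omega) (by norm_num) (by norm_num) hst' hbnd']
          exact (unwind_place b es k val v stack r c hlt hrc hZ hn hF).symm
        · rename_i hF
          cases stack with
          | nil =>
            rw [unwind_false_nil b es k val b
              (searchFrom_at_none b es k val r c hlt hrc hF)]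
          | cons v rest =>
            rw [List.length_cons] at hsl
            have hk1 : 1 ≤ k := by omega
            cases hrc' : es.getD (k - 1) (0, 0) with
            | mk r' c' =>
              dsimp only
              have hmem' : (r', c') ∈ es := by
                rw [← hrc']; exact getD_mem es (k - 1) (by omega)
              obtain ⟨hr', hc'⟩ := hR (r', c') hmem'
              have hnm' : (r', c') ∉ es.drop k := by
                have := getD_not_mem_drop es hn (k - 1) (by omega)
                rw [hrc'] at this
                have he : k - 1 + 1 = k := by omega
                rwa [he] at this
              have hdrop' : es.drop (k - 1) = (r', c') :: es.drop k := by
                rw [drop_cons_at es (k - 1) (by omega), hrc']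
                have he : k - 1 + 1 = k := by omega
                rw [he]
              have hR' : ∀ p ∈ es, p.1 < (setCell b r' c' 0).length ∧
                  p.2 < ((setCell b r' c' 0).getD p.1 []).length := by
                intro p hp
                obtain ⟨a1, a2⟩ := hR p hp
                exact ⟨by rwa [length_setCell], by rwa [rowlen_setCell]⟩
              have hZ' : GoodCells (setCell b r' c' 0) (es.drop (k - 1)) := by
                intro p hp
                rw [hdrop'] at hp
                rcases List.mem_cons.mp hp with h | h
                · subst h
                  exact ⟨by rwa [length_setCell], by rwa [rowlen_setCell],
                    by rw [get_setCell_self b r' c' 0 hr' hc']⟩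
                · obtain ⟨a1, a2, a3⟩ := hZ p h
                  refine ⟨by rwa [length_setCell], by rwa [rowlen_setCell], ?_⟩
                  obtain ⟨p1, p2⟩ := p
                  rw [get_setCell_ne b r' c' 0 p1 p2
                    (by intro e; rw [e] at h; exact hnm' h)]
                  exact a3
              have hv14 := hst v (List.mem_cons_self ..)
              have hst' : ∀ w ∈ rest, 1 ≤ w ∧ w ≤ 4 := fun w hw =>
                hst w (List.mem_cons_of_mem _ hw)
              have hbnd' : boundF es.length (k - 1) (v + 1) rest ≤ f := by
                have := bound_pop es.length k val v rest hk1 hk h1 h5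
                  hv14.1 hv14.2 (by rw [List.length_cons]; omega) hst'
                omega
              rw [ih (setCell b r' c' 0) es (k - 1) (v + 1) rest hR' hZ' hn
                (by omega) (by omega) (by omega) (by omega) hst' hbnd']
              have hu := unwind_false_cons b es k val v rest b
                (searchFrom_at_none b es k val r c hlt hrc hF)
              rw [hrc'] at hu
              exact hu.symm
    · rw [if_neg hlt]
      have hnil : es.drop k = [] := List.drop_eq_nil_of_le (by omega)
      exact (unwind_true b es k val stack b (by rw [hnil, searchFrom_nil])).symm

theorem bound_init (n : Nat) : boundF n 0 1 [] ≤ fuelB n := by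
  unfold boundF fuelB
  have h1 : 6 ^ (n + 1) - Vm n 0 1 [] ≤ 6 ^ (n + 1) := Nat.sub_le _ _
  have h2 : (6 ^ (n + 1) - Vm n 0 1 []) * (n + 1) ≤ 6 ^ (n + 1) * (n + 1) :=
    Nat.mul_le_mul_right _ h1
  have h3 : 6 ^ (n + 1) * (n + 1) = (n + 1) * 6 ^ (n + 1) := by ring
  rw [h3] at h2
  generalize hX : (6 ^ (n + 1) - Vm n 0 1 []) * (n + 1) = X at h2 ⊢
  generalize hY : (n + 1) * 6 ^ (n + 1) = Y at h2 ⊢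
  omega

-- ===== VERDICT (by name: the statement is the Claim_ definition above) =====
theorem solve_spec : Claim_equal_solve := by
  unfold Claim_equal_solve Spec_solve
  intro bo _ hpre
  have hs : Shape bo := hpre
  unfold solve solve_alt
  rw [solveFuel_eq_searchFrom (emptiesB bo).length bo le_rfl hs
    ((emptiesB bo).length + 1) le_rfl]
  rw [loopB_eq_unwind (fuelB (emptiesB bo).length) bo (emptiesB bo) 0 1 []
    (fun p hp => ⟨((goodCells_emptiesB bo hs) p hp).1,
      ((goodCells_emptiesB bo hs) p hp).2.1⟩)
    (by rw [List.drop_zero]; exact goodCells_emptiesB bo hs)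
    (nodup_emptiesB bo) rfl (by omega) (by norm_num) (by norm_num)
    (by intro w hw; simp at hw) (bound_init _)]
  cases hS : searchFrom bo (emptiesB bo) (1 : Int) with
  | mk s1 s2 =>
    cases s1 with
    | true =>
      rw [unwind_true bo (emptiesB bo) 0 1 [] s2 (by rw [List.drop_zero]; exact hS)]
    | false =>
      rw [unwind_false_nil bo (emptiesB bo) 0 1 s2 (by rw [List.drop_zero]; exact hS)]
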